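-- pv_equiv track=rewrite | github.com/Oladayo234/student-management-system | SK Task/pybank_functions.py | get_transaction_summary
-- ===== SOURCE A (Python) =====
-- def get_transaction_summary(transaction):
--     transaction_summary = {"credit": 0, "debit": 0, "net_balance": 0, "transaction_count": 0}
--     for count in range(len(transaction)):
--         if(transaction[count][0] == "credit"):
--             transaction_summary["credit"] += transaction[count][1]
--         elif(transaction[count][0] == "debit"):
--             transaction_summary["debit"] += transaction[count][1]
--
--         transaction_summary["transaction_count"] += 1
--     return transaction_summary
-- ===== SOURCE B (Python) =====
-- def get_transaction_summary(transaction):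
--     return {
--         "credit": sum(t[1] for t in transaction if t[0] == "credit"),
--         "debit": sum(t[1] for t in transaction if t[0] == "debit"),
--         "net_balance": 0,
--         "transaction_count": len(transaction),
--     }
-- ===== Notes on version B (the rewrite author's own statement) =====
-- stated objective: simpler
-- what changed: Replaces the fused index loop that mutates a dict in place with independent per-field computations (two filtered sums, len for the count, constant 0 for net_balance) assembled into the dict at the end.
import Mathlib
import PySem

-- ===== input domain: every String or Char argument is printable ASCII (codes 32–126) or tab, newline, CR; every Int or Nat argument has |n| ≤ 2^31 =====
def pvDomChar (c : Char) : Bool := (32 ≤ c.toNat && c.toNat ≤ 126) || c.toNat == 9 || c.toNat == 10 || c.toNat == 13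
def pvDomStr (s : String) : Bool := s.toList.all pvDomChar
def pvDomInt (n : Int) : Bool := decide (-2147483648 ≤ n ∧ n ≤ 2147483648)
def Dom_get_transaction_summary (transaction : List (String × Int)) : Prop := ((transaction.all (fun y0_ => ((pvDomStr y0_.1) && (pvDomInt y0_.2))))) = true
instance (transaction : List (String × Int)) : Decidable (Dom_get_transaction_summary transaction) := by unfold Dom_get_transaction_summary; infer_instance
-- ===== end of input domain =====

-- B computes each summary field independently (two filtered sums, len, constant 0)
-- instead of A's fused index loop mutating a dict in place; same O(n) cost, plainer code.

-- ===== PORT A =====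
-- the body of A's for-loop (one iteration: the if/elif updates, then the count update)
def pvLoopBodyA (d : PySem.Dict String Int) (t : String × Int) : PySem.Dict String Int :=
  let d :=
    if t.1 = "credit" then d.insert "credit" (d.getD "credit" 0 + t.2)
    else if t.1 = "debit" then d.insert "debit" (d.getD "debit" 0 + t.2)
    else d
  d.insert "transaction_count" (d.getD "transaction_count" 0 + 1)

def get_transaction_summary (transaction : List (String × Int)) : List (String × Int) :=
  ((PySem.List.pyRange 0 (PySem.List.len transaction) 1).foldl
    (fun d count => pvLoopBodyA d (PySem.List.pyGetD transaction count ("", 0)))  -- index always in range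
    (PySem.Dict.ofList [("credit", 0), ("debit", 0), ("net_balance", 0), ("transaction_count", 0)])).items

-- ===== PORT B =====
def get_transaction_summary_alt (transaction : List (String × Int)) : List (String × Int) :=
  [("credit", ((transaction.filter (fun t => t.1 == "credit")).map Prod.snd).sum),
   ("debit", ((transaction.filter (fun t => t.1 == "debit")).map Prod.snd).sum),
   ("net_balance", 0),
   ("transaction_count", (transaction.length : Int))]

-- ===== PRECONDITION & SPEC =====
def Spec_get_transaction_summary (transaction : List (String × Int)) (out : List (String × Int)) : Prop := out = get_transaction_summary_alt transaction
instance (transaction : List (String × Int)) (out : List (String × Int)) : Decidable (Spec_get_transaction_summary transaction out) := by unfold Spec_get_transaction_summary; infer_instance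

-- ===== CLAIM (what is proved, stated in full; the proofs are below) =====
def Claim_equal_get_transaction_summary : Prop := ∀ (transaction : List (String × Int)), Dom_get_transaction_summary transaction → Spec_get_transaction_summary transaction (get_transaction_summary transaction)

-- ===== LEMMAS AND PROOFS =====

-- the summary dict A maintains, parametrised over the three running values
def pvSummary (c d k : Int) : PySem.Dict String Int :=
  ⟨[("credit", c), ("debit", d), ("net_balance", 0), ("transaction_count", k)]⟩

lemma pvStep (c d k : Int) (t : String × Int) :
    pvLoopBodyA (pvSummary c d k) t
      = pvSummary (if t.1 = "credit" then c + t.2 else c)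
                  (if t.1 = "debit" then d + t.2 else d) (k + 1) := by
  by_cases hc : t.1 = "credit"
  · simp [pvLoopBodyA, pvSummary, hc, PySem.Dict.insert, PySem.Dict.getD, PySem.Dict.get?,
      PySem.Dict.contains]
  · by_cases hd : t.1 = "debit"
    · simp [pvLoopBodyA, pvSummary, hd, PySem.Dict.insert, PySem.Dict.getD, PySem.Dict.get?,
        PySem.Dict.contains]
    · simp [pvLoopBodyA, pvSummary, hc, hd, PySem.Dict.insert, PySem.Dict.getD, PySem.Dict.get?,
        PySem.Dict.contains]

lemma pvLoop (ts : List (String × Int)) (c d k : Int) :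
    (ts.foldl pvLoopBodyA (pvSummary c d k)).items
      = [("credit", c + ((ts.filter (fun t => t.1 == "credit")).map Prod.snd).sum),
         ("debit", d + ((ts.filter (fun t => t.1 == "debit")).map Prod.snd).sum),
         ("net_balance", 0),
         ("transaction_count", k + (ts.length : Int))] := by
  induction ts generalizing c d k with
  | nil => simp [pvSummary]
  | cons t ts ih =>
    rw [List.foldl_cons, pvStep, ih]
    by_cases hc : t.1 = "credit" <;> by_cases hd : t.1 = "debit" <;>
      simp [hc, hd] <;> and_intros <;> omega

-- ===== VERDICT (by name: the statement is the Claim_ definition above) =====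
theorem get_transaction_summary_spec : Claim_equal_get_transaction_summary := by
  intro transaction _
  show _ = _
  unfold get_transaction_summary get_transaction_summary_alt
  rw [PySem.List.foldl_pyRange_zero_pyGetD transaction ("", 0) pvLoopBodyA]
  have h0 : PySem.Dict.ofList [("credit", (0:Int)), ("debit", 0), ("net_balance", 0), ("transaction_count", 0)] = pvSummary 0 0 0 := by decide
  rw [h0]
  simpa using pvLoop transaction 0 0 0
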